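-- pv_equiv track=rewrite | github.com/insutance/python-and-sql | python/Lv2_기능개발.py | solution
-- ===== SOURCE A (Python) =====
-- def solution(progresses, speeds):
--     days = []
--     for progress, speed in zip(progresses, speeds):
--         day = 1                                         # day(배포 가능 날짜)를 1로 초기화
--         while True:
--             if progress + (speed * day) < 100:          # 진도율이 100%보다 작다면
--                 day += 1                                # day +1
--             else:
--                 break                                   # 진도율이 100% 이상이라면 반복문 종료
--         days.append(day)                                # days에 day(해당 배포 가능 날짜)를 추가
--
--     answer = []
--     while days:                     # 리스트(days)의 길이가 0 보다 클때 (= None이 아닐 때까지)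
--         cnt = 1                     # cnt(배포 가능한 기능 수)를 1로 초기화
--         day = days.pop(0)
--
--         while days:
--             if day >= days[0]:
--                 days.pop(0)         # days에서 day보다 작은 값들을 계속해서 pop
--                 cnt += 1            # pop 하게 되면 cnt +1
--             else:
--                 break               # days[0]이 day보다 크다면 break
--         answer.append(cnt)
--
--     return answer
-- ===== SOURCE B (Python) =====
-- def solution(progresses, speeds):
--     # completion day: 1 if done after one day, else ceiling division of the remaining work
--     days = [1 if p + s >= 100 else -((p - 100) // s) for p, s in zip(progresses, speeds)]
--     answer = []
--     i, n = 0, len(days)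
--     while i < n:
--         j = i + 1
--         while j < n and days[j] <= days[i]:
--             j += 1
--         answer.append(j - i)
--         i = j
--     return answer
-- ===== Notes on version B (the rewrite author's own statement) =====
-- stated objective: faster
-- what changed: B computes each completion day by one ceiling division instead of A's day-by-day counting loop, and groups with an index pointer over the list instead of repeatedly pop(0)-ing the front.
import Mathlib
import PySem

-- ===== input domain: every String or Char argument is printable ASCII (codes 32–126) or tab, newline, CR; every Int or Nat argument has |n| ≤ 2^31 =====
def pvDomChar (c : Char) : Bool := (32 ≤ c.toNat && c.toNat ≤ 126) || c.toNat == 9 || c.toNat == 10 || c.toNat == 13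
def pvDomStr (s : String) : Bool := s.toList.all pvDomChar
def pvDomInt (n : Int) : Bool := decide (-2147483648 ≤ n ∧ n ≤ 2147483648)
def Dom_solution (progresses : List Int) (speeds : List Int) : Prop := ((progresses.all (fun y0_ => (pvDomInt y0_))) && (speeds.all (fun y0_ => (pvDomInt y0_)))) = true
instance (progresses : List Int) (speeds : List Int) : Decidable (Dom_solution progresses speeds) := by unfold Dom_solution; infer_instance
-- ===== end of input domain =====

-- B replaces A's day-by-day counting loop with one ceiling division per feature and A's
-- repeated pop(0) grouping with a single index-pointer pass (objective: faster).
-- A diverges when some pair has speed ≤ 0 and progress + speed < 100; Pre_ excludes exactly those inputs.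

-- ===== PORT A =====
-- the inner 'while True' loop; fuel bounds the iterations (inside Pre_ the loop always
-- breaks before the fuel runs out, see lemma loopA_eq below)
def loopA (fuel : Nat) (p s day : Int) : Int :=
  match fuel with
  | 0 => day
  | Nat.succ fuel => if p + s * day < 100 then loopA fuel p s (day + 1) else day

-- inner pop(0)-loop of the second phase: returns (cnt, remaining days)
def innerA (day : Int) (days : List Int) (cnt : Int) : Int × List Int :=
  match days with
  | [] => (cnt, [])
  | d :: rest => if day ≥ d then innerA day rest (cnt + 1) else (cnt, d :: rest)

theorem innerA_len (day : Int) (days : List Int) (cnt : Int) :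
    (innerA day days cnt).2.length ≤ days.length := by
  induction days generalizing cnt with
  | nil => simp [innerA]
  | cons d rest ih =>
    simp only [innerA]
    split
    · exact le_trans (ih (cnt + 1)) (by simp)
    · simp

-- outer 'while days' loop
def outerA (days : List Int) : List Int :=
  match days with
  | [] => []
  | d :: rest =>
    let r := innerA d rest 1
    r.1 :: outerA r.2
termination_by days.length
decreasing_by
  simpa using Nat.lt_succ_of_le (innerA_len d rest 1)

def solution (progresses : List Int) (speeds : List Int) : List Int :=
  outerA ((List.zip progresses speeds).map (fun pr => loopA (103 - pr.1).toNat pr.1 pr.2 1))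

-- ===== PORT B =====
def dayB (p s : Int) : Int :=
  if p + s ≥ 100 then 1 else -(PySem.Int.floordiv (p - 100) s)

-- inner 'while j < n and days[j] <= days[i]' loop
def advB (days : List Int) (lead : Int) (j : Nat) : Nat :=
  if j < days.length then
    if days.getD j 0 ≤ lead then advB days lead (j + 1) else j
  else j
termination_by days.length - j

theorem advB_ge (days : List Int) (lead : Int) (j : Nat) : j ≤ advB days lead j := by
  induction j using advB.induct days lead with
  | case1 j h1 h2 ih => rw [advB, if_pos h1, if_pos h2]; omega
  | case2 j h1 h2 => rw [advB, if_pos h1, if_neg h2]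
  | case3 j h1 => rw [advB, if_neg h1]

-- outer 'while i < n' loop
def outerB (days : List Int) (i : Nat) : List Int :=
  if _h : i < days.length then
    let j := advB days (days.getD i 0) (i + 1)
    ((j : Int) - (i : Int)) :: outerB days j
  else []
termination_by days.length - i
decreasing_by
  have := advB_ge days (days.getD i 0) (i + 1)
  omega

def solution_alt (progresses : List Int) (speeds : List Int) : List Int :=
  outerB ((List.zip progresses speeds).map (fun pr => dayB pr.1 pr.2)) 0

-- ===== PRECONDITION & SPEC =====
-- Pre_ excludes exactly the pairs on which A's inner while-loop never breaks (A diverges):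
-- speed ≤ 0 together with progress + speed < 100.
def Pre_solution (progresses : List Int) (speeds : List Int) : Prop :=
  ∀ pr ∈ List.zip progresses speeds, 0 < pr.2 ∨ 100 ≤ pr.1 + pr.2
instance (progresses : List Int) (speeds : List Int) : Decidable (Pre_solution progresses speeds) := by unfold Pre_solution; infer_instance

def pvWitness_solution : List Int × List Int := ([93, 30, 55], [1, 30, 5])

def Spec_solution (progresses : List Int) (speeds : List Int) (out : List Int) : Prop := out = solution_alt progresses speeds
instance (progresses : List Int) (speeds : List Int) (out : List Int) : Decidable (Spec_solution progresses speeds out) := by unfold Spec_solution; infer_instance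

-- ===== CLAIM (what is proved, stated in full; the proofs are below) =====
def Claim_equal_solution : Prop := ∀ (progresses : List Int) (speeds : List Int), Dom_solution progresses speeds → Pre_solution progresses speeds → Spec_solution progresses speeds (solution progresses speeds)

-- ===== LEMMAS AND PROOFS =====

-- Phase 1: the counting loop computes the ceiling-division day.
theorem loopA_reaches (p s : Int) (hs : 0 < s) (d : Int)
    (hge : 100 ≤ p + s * d) (hlt : p + s * (d - 1) < 100) :
    ∀ (fuel : Nat) (day : Int), day ≤ d → (d - day).toNat ≤ fuel →
      loopA fuel p s day = d := by
  intro fuel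
  induction fuel with
  | zero =>
    intro day h1 h2
    have : day = d := by omega
    simp [loopA, this]
  | succ fuel ih =>
    intro day h1 h2
    rw [loopA]
    split
    · rename_i hcond
      have hne : day ≠ d := by
        intro he; rw [he] at hcond; omega
      exact ih (day + 1) (by omega) (by omega)
    · rename_i hcond
      -- day = d: otherwise day ≤ d - 1 and monotonicity gives p + s*day < 100
      by_contra _
      rcases lt_or_eq_of_le h1 with hlt2 | he
      · have : s * day ≤ s * (d - 1) := by
          apply mul_le_mul_of_nonneg_left (by omega) (le_of_lt hs)
        omega
      · rw [he] at hcond; omega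

theorem dayB_eq_loopA (p s : Int) (h : 0 < s ∨ 100 ≤ p + s) :
    loopA (103 - p).toNat p s 1 = dayB p s := by
  by_cases hdone : 100 ≤ p + s
  · -- loop breaks immediately, dayB = 1
    have : ¬ (p + s * 1 < 100) := by omega
    unfold dayB
    rw [if_pos hdone]
    cases hf : (103 - p).toNat with
    | zero => simp [loopA]
    | succ n => rw [loopA, if_neg this]
  · have hs : 0 < s := by tauto
    set q := PySem.Int.floordiv (p - 100) s with hq
    have hmod := PySem.Int.floordiv_mul_add_mod (p - 100) s
    have hm0 : 0 ≤ PySem.Int.mod (p - 100) s := by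
      have := PySem.Int.mod_nonneg (p - 100) hs
      exact this
    have hms : PySem.Int.mod (p - 100) s < s := PySem.Int.mod_lt (p - 100) hs
    set r := PySem.Int.mod (p - 100) s with hr
    -- p - 100 = q * s + r, 0 ≤ r < s; d = -q
    have hge : 100 ≤ p + s * (-q) := by nlinarith [hmod]
    have hlt : p + s * (-q - 1) < 100 := by nlinarith [hmod]
    have hd1 : 1 ≤ -q := by
      by_contra hc
      have h0 : -q ≤ 0 := by omega
      have : s * (-q) ≤ 0 := mul_nonpos_of_nonneg_of_nonpos (le_of_lt hs) h0
      omega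
    have hub : -q ≤ 100 - p := by
      have h1 : s * (-q - 1) < 100 - p := by omega
      have h2 : (-q - 1) ≤ s * (-q - 1) := le_mul_of_one_le_left (by omega) hs
      omega
    have := loopA_reaches p s hs (-q) hge hlt (103 - p).toNat 1 (by omega) (by omega)
    rw [this]
    unfold dayB
    rw [if_neg hdone]

-- Phase 2: innerA characterised by takeWhile/dropWhile.
theorem innerA_spec (day : Int) (days : List Int) (cnt : Int) :
    innerA day days cnt =
      (cnt + ((days.takeWhile (fun d => d ≤ day)).length : Int),
       days.dropWhile (fun d => d ≤ day)) := by
  induction days generalizing cnt with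
  | nil => simp [innerA]
  | cons d rest ih =>
    rw [List.takeWhile_cons, List.dropWhile_cons]
    by_cases h : d ≤ day
    · simp only [innerA, ge_iff_le, h, if_true, decide_true, ih, List.length_cons]
      refine Prod.ext ?_ rfl
      push_cast
      ring
    · simp [innerA, h]

-- advB over pre ++ l, started at |pre|, skips exactly the ≤-prefix of l.
theorem advB_spec (lead : Int) (l pre : List Int) :
    advB (pre ++ l) lead pre.length =
      pre.length + (l.takeWhile (fun d => d ≤ lead)).length := by
  induction l generalizing pre with
  | nil =>
    rw [advB]; simp
  | cons d rest ih =>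
    rw [advB]
    have hlen : pre.length < (pre ++ d :: rest).length := by simp
    rw [if_pos hlen]
    have hget : (pre ++ d :: rest).getD pre.length 0 = d := by
      simp [List.getD]
    rw [hget]
    by_cases h : d ≤ lead
    · rw [if_pos h]
      have h2 : pre.length + 1 = (pre ++ [d]).length := by simp
      have h3 : pre ++ d :: rest = (pre ++ [d]) ++ rest := by simp
      rw [h2, h3, ih (pre ++ [d])]
      simp [List.takeWhile, h]
      omega
    · rw [if_neg h]
      simp [List.takeWhile, h]

theorem outerB_eq_outerA (l pre : List Int) : outerB (pre ++ l) pre.length = outerA l := by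
  cases l with
  | nil =>
    rw [outerB]
    simp [outerA]
  | cons d rest =>
    rw [outerB]
    have hlen : pre.length < (pre ++ d :: rest).length := by simp
    rw [dif_pos hlen]
    have hget : (pre ++ d :: rest).getD pre.length 0 = d := by
      simp [List.getD]
    have h2 : pre.length + 1 = (pre ++ [d]).length := by simp
    have h3 : pre ++ d :: rest = (pre ++ [d]) ++ rest := by simp
    have hadv : advB (pre ++ d :: rest) ((pre ++ d :: rest).getD pre.length 0) (pre.length + 1) =
        (pre ++ [d]).length + (rest.takeWhile (fun x => x ≤ d)).length := by
      rw [hget, h2, h3]; exact advB_spec d rest (pre ++ [d])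
    have hsplit : pre ++ d :: rest =
        (pre ++ d :: rest.takeWhile (fun x => x ≤ d)) ++ rest.dropWhile (fun x => x ≤ d) := by
      simp [List.takeWhile_append_dropWhile]
    have hplen : (pre ++ [d]).length + (rest.takeWhile (fun x => x ≤ d)).length
        = (pre ++ d :: rest.takeWhile (fun x => x ≤ d)).length := by
      simp; omega
    have htail : outerB (pre ++ d :: rest)
        ((pre ++ [d]).length + (rest.takeWhile (fun x => x ≤ d)).length) =
        outerA (rest.dropWhile (fun x => x ≤ d)) := by
      rw [hplen]
      conv_lhs => rw [hsplit]
      exact outerB_eq_outerA (rest.dropWhile (fun x => x ≤ d)) _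
    simp only [hadv]
    rw [htail, outerA, innerA_spec]
    simp only [List.length_append, List.length_cons, List.length_nil]
    congr 1
    push_cast
    ring
termination_by l.length
decreasing_by
  have := List.length_dropWhile_le (p := fun x => x ≤ d) (l := rest)
  simp
  omega

theorem solution_days_eq (progresses speeds : List Int)
    (hpre : Pre_solution progresses speeds) :
    (List.zip progresses speeds).map (fun pr => loopA (103 - pr.1).toNat pr.1 pr.2 1) =
    (List.zip progresses speeds).map (fun pr => dayB pr.1 pr.2) := by
  apply List.map_congr_left
  intro pr hmem
  exact dayB_eq_loopA pr.1 pr.2 (hpre pr hmem)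

-- ===== VERDICT (by name: the statement is the Claim_ definition above) =====
theorem solution_spec : Claim_equal_solution := by
  intro progresses speeds _ hpre
  unfold Spec_solution solution solution_alt
  rw [solution_days_eq progresses speeds hpre]
  have := outerB_eq_outerA ((List.zip progresses speeds).map (fun pr => dayB pr.1 pr.2)) []
  simpa using this.symm
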